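-- pv_equiv track=rewrite | github.com/y38y38/pdf_to_txt_script | txt2cvs.py | del_topnumberandspace
-- ===== SOURCE A (Python) =====
-- def is_number(char):
-- 	if (char != '1'):
-- 		if ((char) != '2'):
-- 			if ((char) != '3'):
-- 				if ((char) != '4'):
-- 					if ((char) != '5'):
-- 						if ((char) != '6'):
-- 							if ((char) != '7'):
-- 								if ((char) != '8'):
-- 									if ((char) != '9'):
-- 										return False
--
-- 	return True
--
-- def del_topnumberandspace(message):
-- 	#str new_message
-- 	new_message = ''
-- 	message_len = len(message)
--
-- 	counter = 0
-- 	search_end = 0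
-- 	is_space = 0
-- 	for i in message:
-- 		if (search_end == 0):
-- 			if (is_number(message[counter])==False):
-- 				new_message = new_message + i
-- 			else:
-- 				search_end = 1
-- 				is_space = 1
--
-- 		else:
-- 			if (is_space == 0):
-- 				new_message = new_message + i
-- 			else:
-- 				is_space = 0
--
--
-- 		counter = counter + 1
--
-- 	return new_message
-- ===== SOURCE B (Python) =====
-- def del_topnumberandspace(message):
--     for i, c in enumerate(message):
--         if c in '123456789':
--             return message[:i] + message[i + 2:]
--     return message
-- ===== Notes on version B (the rewrite author's own statement) =====
-- stated objective: simpler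
-- what changed: Replaces the whole-string state-machine copy loop (flags search_end/is_space, per-character index lookup and character-by-character string concatenation) by finding the index of the first nonzero digit and returning two slices that drop the digit and the following character.
import Mathlib
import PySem

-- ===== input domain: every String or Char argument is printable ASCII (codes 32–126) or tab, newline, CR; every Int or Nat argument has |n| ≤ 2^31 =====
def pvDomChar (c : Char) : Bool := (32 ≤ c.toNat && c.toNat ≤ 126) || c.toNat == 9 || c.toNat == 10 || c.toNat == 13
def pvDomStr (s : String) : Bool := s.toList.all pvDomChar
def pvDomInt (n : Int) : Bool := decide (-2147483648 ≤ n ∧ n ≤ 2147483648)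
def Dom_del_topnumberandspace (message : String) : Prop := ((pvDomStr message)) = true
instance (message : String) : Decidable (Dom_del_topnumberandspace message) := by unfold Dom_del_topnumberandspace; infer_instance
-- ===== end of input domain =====

-- B replaces A's state-machine copy loop by "find first nonzero digit, return prefix ++ rest after digit+1" (objective: simpler).

-- ===== PORT A =====
def is_number (char : Char) : Bool :=
  if char ≠ '1' then
    if char ≠ '2' then
      if char ≠ '3' then
        if char ≠ '4' then
          if char ≠ '5' then
            if char ≠ '6' then
              if char ≠ '7' then
                if char ≠ '8' then
                  if char ≠ '9' then
                    false
                  else true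
                else true
              else true
            else true
          else true
        else true
      else true
    else true
  else true

-- one iteration of A's for-loop body; l is the full character list of message
-- (message[counter] is ported with pyGet?; counter is always in range while the
--  loop runs, so getD's default i is never used)
def aStep (l : List Char) (st : List Char × Int × Int × Int) (i : Char) :
    List Char × Int × Int × Int :=
  let (new_message, counter, search_end, is_space) := st
  let st' :=
    if search_end == 0 then
      if is_number ((PySem.List.pyGet? l counter).getD i) == false then
        (new_message ++ [i], search_end, is_space)
      else
        (new_message, (1 : Int), (1 : Int))
    else
      if is_space == 0 then
        (new_message ++ [i], search_end, is_space)
      else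
        (new_message, search_end, (0 : Int))
  (st'.1, counter + 1, st'.2.1, st'.2.2)

def del_topnumberandspace (message : String) : String :=
  String.ofList (message.toList.foldl (aStep message.toList) ([], 0, 0, 0)).1

-- ===== PORT B =====
def del_topnumberandspace_alt (message : String) : String :=
  match message.toList.findIdx? (fun c => "123456789".toList.contains c) with
  | none => message
  | some k =>
      String.ofList (PySem.List.slice message.toList none (some (k : Int)) ++
                     PySem.List.slice message.toList (some ((k : Int) + 2)) none)

-- ===== PRECONDITION & SPEC =====
def Spec_del_topnumberandspace (message : String) (out : String) : Prop := out = del_topnumberandspace_alt message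
instance (message : String) (out : String) : Decidable (Spec_del_topnumberandspace message out) := by unfold Spec_del_topnumberandspace; infer_instance

-- ===== CLAIM (what is proved, stated in full; the proofs are below) =====
def Claim_equal_del_topnumberandspace : Prop := ∀ (message : String), Dom_del_topnumberandspace message → Spec_del_topnumberandspace message (del_topnumberandspace message)

-- ===== LEMMAS AND PROOFS =====

theorem is_number_eq (c : Char) :
    is_number c = "123456789".toList.contains c := by
  unfold is_number
  split_ifs <;> simp_all

-- in state search_end = 1, is_space = 0, the loop copies every remaining char
theorem loop_copy (l : List Char) (cs : List Char) :
    ∀ (acc : List Char) (n : Int),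
      (cs.foldl (aStep l) (acc, n, 1, 0)).1 = acc ++ cs := by
  induction cs with
  | nil => intro acc n; simp
  | cons c cs ih =>
      intro acc n
      simp only [List.foldl_cons, aStep]
      simpa using ih (acc ++ [c]) (n + 1)

-- in state search_end = 1, is_space = 1, the loop drops one char then copies
theorem loop_after (l : List Char) (cs : List Char) (acc : List Char) (n : Int) :
    (cs.foldl (aStep l) (acc, n, 1, 1)).1 = acc ++ cs.tail := by
  cases cs with
  | nil => simp
  | cons c cs =>
      simp only [List.foldl_cons, aStep, List.tail_cons]
      simpa using loop_copy l cs acc (n + 1)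

-- main invariant: in the searching state at position n (with the rest of l ahead)
theorem loop_search (l : List Char) (cs : List Char) :
    ∀ (n : Nat) (acc : List Char), l.drop n = cs →
      (cs.foldl (aStep l) (acc, (n : Int), 0, 0)).1 =
        acc ++ (match cs.findIdx? (fun c => "123456789".toList.contains c) with
                | none => cs
                | some k => cs.take k ++ cs.drop (k + 2)) := by
  induction cs with
  | nil => intro n acc _; simp
  | cons c cs ih =>
      intro n acc hdrop
      have hn : n < l.length := by
        by_contra h
        simp [List.drop_eq_nil_of_le (Nat.le_of_not_lt h)] at hdrop
      have hget : PySem.List.pyGet? l (n : Int) = some c := by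
        rw [PySem.List.pyGet?_natCast]
        have : l[n]? = (l.drop n).head? := by
          simp [List.head?_drop]
        rw [this, hdrop]; rfl
      have hdrop' : l.drop (n + 1) = cs := by
        rw [← List.tail_drop, hdrop]; rfl
      by_cases hc : ("123456789".toList.contains c) = true
      · -- digit found at this position
        have hmem : c = '1' ∨ c = '2' ∨ c = '3' ∨ c = '4' ∨ c = '5' ∨ c = '6' ∨ c = '7' ∨
            c = '8' ∨ c = '9' := by simpa using hc
        have hb : (is_number c == false) = false := by
          simp only [is_number_eq]; simp; tauto
        have hstep : aStep l (acc, (n : Int), 0, 0) c = (acc, (n : Int) + 1, 1, 1) := by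
          simp [aStep, hget, hb]
        have hfi : (c :: cs).findIdx? (fun c => "123456789".toList.contains c) = some 0 := by
          simp [List.findIdx?_cons]; tauto
        rw [List.foldl_cons, hstep, hfi]
        simpa [List.drop_succ_cons, List.drop_one]
          using loop_after l cs acc ((n : Int) + 1)
      · -- not a digit: keep copying, recurse
        have hc' : ("123456789".toList.contains c) = false := by
          simp only [Bool.not_eq_true] at hc; exact hc
        have hne : ¬c = '1' ∧ ¬c = '2' ∧ ¬c = '3' ∧ ¬c = '4' ∧ ¬c = '5' ∧ ¬c = '6' ∧
            ¬c = '7' ∧ ¬c = '8' ∧ ¬c = '9' := by simpa using hc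
        have hb : (is_number c == false) = true := by
          simp only [is_number_eq]; simp; tauto
        have hstep : aStep l (acc, (n : Int), 0, 0) c = (acc ++ [c], (n : Int) + 1, 0, 0) := by
          simp [aStep, hget, hb]
        have hcast : ((n : Int) + 1) = ((n + 1 : Nat) : Int) := by push_cast; ring
        rw [List.foldl_cons, hstep, hcast, ih (n + 1) (acc ++ [c]) hdrop']
        simp only [List.findIdx?_cons, hc']
        cases hfi : cs.findIdx? (fun c => "123456789".toList.contains c) with
        | none => simp
        | some k => simp [List.take_succ_cons, List.drop_succ_cons]

theorem del_topnumberandspace_eq (message : String) :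
    del_topnumberandspace message = del_topnumberandspace_alt message := by
  unfold del_topnumberandspace del_topnumberandspace_alt
  have h := loop_search message.toList message.toList 0 [] (by simp)
  simp only [Int.natCast_zero] at h
  rw [h]
  cases hfi : message.toList.findIdx? (fun c => "123456789".toList.contains c) with
  | none => simp
  | some k =>
      simp only [List.nil_append]
      congr 1
      rw [PySem.List.slice_to_natCast]
      have : ((k : Int) + 2) = ((k + 2 : Nat) : Int) := by push_cast; ring
      rw [this, PySem.List.slice_from_natCast]

-- ===== VERDICT (by name: the statement is the Claim_ definition above) =====
theorem del_topnumberandspace_spec : Claim_equal_del_topnumberandspace := by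
  intro message _
  unfold Spec_del_topnumberandspace
  exact del_topnumberandspace_eq message
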